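-- pv_equiv track=rewrite | github.com/HarshaVippala/ResumeForge | backend/services/resume/enhancers/skills_merger.py | _get_target_sections
-- ===== SOURCE A (Python) =====
-- from typing import Dict, List, Any, Optional, Set
--
-- def _get_target_sections(base_skills: Dict[str, Any], target_sections: Optional[List[str]]) -> Dict[str, List[str]]:
--     """Get sections to process with proper mapping"""
--
--     # Create section mapping
--     section_mapping = {
--         'Languages & Frameworks': base_skills.get('programming_languages', []) + base_skills.get('frameworks_libraries_tools', [])[:8],
--         'Cloud & DevOps': base_skills.get('cloud_devops_tools', []),
--         'APIs & Integration': [skill for skill in base_skills.get('frameworks_libraries_tools', []) if any(api_term in skill.lower() for api_term in ['api', 'graphql', 'grpc', 'swagger', 'oauth'])],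
--         'Architecture & Design': base_skills.get('architecture_design_concepts', []),
--         'Databases & Storage': base_skills.get('databases', []),
--         'Monitoring & Observability': [skill for skill in base_skills.get('frameworks_libraries_tools', []) if any(monitor_term in skill.lower() for monitor_term in ['new relic', 'datadog', 'cloudwatch', 'elk', 'grafana', 'telemetry'])],
--         'Testing & CI/CD': [skill for skill in base_skills.get('frameworks_libraries_tools', []) if any(test_term in skill.lower() for test_term in ['jest', 'cypress', 'jenkins', 'github actions', 'gitlab'])],
--     }
--
--     if target_sections:
--         return {section: skills for section, skills in section_mapping.items() if section in target_sections}
--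
--     return section_mapping
-- ===== SOURCE B (Python) =====
-- from typing import Dict, List, Any, Optional
--
-- # Data-driven section table: each entry is (section name, spec).
-- # spec kinds: ('langs',) -> languages + first 8 frameworks;
-- #             ('key', k) -> base_skills.get(k, []);
-- #             ('terms', ts) -> frameworks whose lowercase form contains any term.
-- _SECTIONS = (
--     ('Languages & Frameworks', ('langs',)),
--     ('Cloud & DevOps', ('key', 'cloud_devops_tools')),
--     ('APIs & Integration', ('terms', ('api', 'graphql', 'grpc', 'swagger', 'oauth'))),
--     ('Architecture & Design', ('key', 'architecture_design_concepts')),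
--     ('Databases & Storage', ('key', 'databases')),
--     ('Monitoring & Observability', ('terms', ('new relic', 'datadog', 'cloudwatch', 'elk', 'grafana', 'telemetry'))),
--     ('Testing & CI/CD', ('terms', ('jest', 'cypress', 'jenkins', 'github actions', 'gitlab'))),
-- )
--
-- def _get_target_sections(base_skills: Dict[str, Any], target_sections: Optional[List[str]]) -> Dict[str, List[str]]:
--     """Get sections to process: walk the section table, skip sections not requested,
--     and compute a section's value only when it is kept."""
--     result = {}
--     for name, spec in _SECTIONS:
--         if target_sections and name not in target_sections:
--             continue
--         kind = spec[0]
--         if kind == 'langs':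
--             value = base_skills.get('programming_languages', []) + base_skills.get('frameworks_libraries_tools', [])[:8]
--         elif kind == 'key':
--             value = base_skills.get(spec[1], [])
--         else:
--             terms = spec[1]
--             value = [s for s in base_skills.get('frameworks_libraries_tools', []) if any(t in s.lower() for t in terms)]
--         result[name] = value
--     return result
-- ===== Notes on version B (the rewrite author's own statement) =====
-- stated objective: alternative
-- what changed: A builds the complete seven-entry mapping with inline comprehensions and then filters it by target_sections; B is table-driven: it walks a declarative list of (section, spec) entries, applies the target filter BEFORE computing a section, and materializes (languages+frameworks / plain key lookup / term-filtered frameworks) only for the sections that are kept, so non-requested sections are never computed.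
import Mathlib
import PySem

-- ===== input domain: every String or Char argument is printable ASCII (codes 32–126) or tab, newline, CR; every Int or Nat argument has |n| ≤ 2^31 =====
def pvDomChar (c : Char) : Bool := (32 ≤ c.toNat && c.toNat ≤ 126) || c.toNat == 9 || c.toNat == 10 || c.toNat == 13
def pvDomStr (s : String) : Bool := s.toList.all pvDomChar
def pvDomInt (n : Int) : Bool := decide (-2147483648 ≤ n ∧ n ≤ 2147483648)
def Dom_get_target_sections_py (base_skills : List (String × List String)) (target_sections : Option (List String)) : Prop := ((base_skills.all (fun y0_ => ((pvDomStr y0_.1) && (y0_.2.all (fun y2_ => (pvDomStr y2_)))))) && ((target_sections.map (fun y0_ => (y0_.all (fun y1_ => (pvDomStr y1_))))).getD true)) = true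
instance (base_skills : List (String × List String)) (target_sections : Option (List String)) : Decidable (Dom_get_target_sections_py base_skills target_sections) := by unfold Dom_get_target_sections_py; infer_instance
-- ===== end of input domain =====

-- B is table-driven and filters BEFORE computing: it walks a declarative (section, spec) table,
-- skips sections not requested, and materializes only the kept sections (objective: alternative).

-- ===== PORT A =====
-- any(term in skill.lower() for term in terms) — shared by both ports (same Python expression)
def pvMatchesA (terms : List String) (skill : String) : Bool :=
  terms.any (fun t => PySem.Str.isIn t (PySem.Str.lower skill))

def get_target_sections_py (base_skills : List (String × List String)) (target_sections : Option (List String)) : List (String × List String) :=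
  let d := PySem.Dict.ofList base_skills
  let section_mapping : List (String × List String) :=
    [("Languages & Frameworks", d.getD "programming_languages" [] ++
        PySem.List.slice (d.getD "frameworks_libraries_tools" []) none (some 8)),
     ("Cloud & DevOps", d.getD "cloud_devops_tools" []),
     ("APIs & Integration",
        (d.getD "frameworks_libraries_tools" []).filter
          (pvMatchesA ["api", "graphql", "grpc", "swagger", "oauth"])),
     ("Architecture & Design", d.getD "architecture_design_concepts" []),
     ("Databases & Storage", d.getD "databases" []),
     ("Monitoring & Observability",
        (d.getD "frameworks_libraries_tools" []).filter
          (pvMatchesA ["new relic", "datadog", "cloudwatch", "elk", "grafana", "telemetry"])),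
     ("Testing & CI/CD",
        (d.getD "frameworks_libraries_tools" []).filter
          (pvMatchesA ["jest", "cypress", "jenkins", "github actions", "gitlab"]))]
  -- 'if target_sections:' — truthy: neither None nor the empty list
  match target_sections with
  | none => section_mapping
  | some ts =>
      if ts.isEmpty then section_mapping
      else section_mapping.filter (fun p => ts.contains p.1)

-- ===== PORT B =====
-- section spec kinds of Source B's _SECTIONS table
inductive PvSrc where
  | langs : PvSrc
  | key : String → PvSrc
  | terms : List String → PvSrc
deriving DecidableEq, Repr

def pvSections : List (String × PvSrc) :=
  [("Languages & Frameworks", .langs),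
   ("Cloud & DevOps", .key "cloud_devops_tools"),
   ("APIs & Integration", .terms ["api", "graphql", "grpc", "swagger", "oauth"]),
   ("Architecture & Design", .key "architecture_design_concepts"),
   ("Databases & Storage", .key "databases"),
   ("Monitoring & Observability", .terms ["new relic", "datadog", "cloudwatch", "elk", "grafana", "telemetry"]),
   ("Testing & CI/CD", .terms ["jest", "cypress", "jenkins", "github actions", "gitlab"])]

-- the if/elif/else dispatch of Source B computing one section's value
def pvSectionValue (d : PySem.Dict String (List String)) : PvSrc → List String
  | .langs => d.getD "programming_languages" [] ++
      PySem.List.slice (d.getD "frameworks_libraries_tools" []) none (some 8)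
  | .key k => d.getD k []
  | .terms ts => (d.getD "frameworks_libraries_tools" []).filter (pvMatchesA ts)

def get_target_sections_py_alt (base_skills : List (String × List String)) (target_sections : Option (List String)) : List (String × List String) :=
  let d := PySem.Dict.ofList base_skills
  -- the loop over the table: 'if target_sections and name not in target_sections: continue'
  pvSections.foldl
    (fun res p =>
      if (match target_sections with
          | none => false
          | some ts => !ts.isEmpty && !ts.contains p.1) then res
      else res ++ [(p.1, pvSectionValue d p.2)])
    []

-- ===== PRECONDITION & SPEC =====
def Spec_get_target_sections_py (base_skills : List (String × List String)) (target_sections : Option (List String)) (out : List (String × List String)) : Prop := out = get_target_sections_py_alt base_skills target_sections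
instance (base_skills : List (String × List String)) (target_sections : Option (List String)) (out : List (String × List String)) : Decidable (Spec_get_target_sections_py base_skills target_sections out) := by unfold Spec_get_target_sections_py; infer_instance

-- ===== CLAIM (what is proved, stated in full; the proofs are below) =====
def Claim_equal_get_target_sections_py : Prop := ∀ (base_skills : List (String × List String)) (target_sections : Option (List String)), Dom_get_target_sections_py base_skills target_sections → Spec_get_target_sections_py base_skills target_sections (get_target_sections_py base_skills target_sections)

-- ===== LEMMAS AND PROOFS =====

-- ===== VERDICT (by name: the statement is the Claim_ definition above) =====
theorem get_target_sections_py_spec : Claim_equal_get_target_sections_py := by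
  intro base_skills target_sections _
  unfold Spec_get_target_sections_py get_target_sections_py get_target_sections_py_alt
  cases target_sections with
  | none => rfl
  | some ts =>
      by_cases hE : ts = []
      · simp [pvSections, pvSectionValue, hE]
      · by_cases h1 : ("Languages & Frameworks" : String) ∈ ts <;>
        by_cases h2 : ("Cloud & DevOps" : String) ∈ ts <;>
        by_cases h3 : ("APIs & Integration" : String) ∈ ts <;>
        by_cases h4 : ("Architecture & Design" : String) ∈ ts <;>
        by_cases h5 : ("Databases & Storage" : String) ∈ ts <;>
        by_cases h6 : ("Monitoring & Observability" : String) ∈ ts <;>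
        by_cases h7 : ("Testing & CI/CD" : String) ∈ ts <;>
          simp [pvSections, pvSectionValue, hE, h1, h2, h3, h4, h5, h6, h7]
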